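-- pv_equiv track=rewrite | github.com/fatihbiyiklio/Geneys-Cloud-Reporting-API | src/app/utils/conversation_helpers.py | _extract_workgroup_from_attrs
-- ===== SOURCE A (Python) =====
-- def _extract_workgroup_from_attrs(ivr_attrs):
--     if not isinstance(ivr_attrs, dict):
--         return None
--     priority_keys = ["workgroup", "wg", "departman", "department", "menu", "selection", "secim"]
--     for pkey in priority_keys:
--         for key, val in ivr_attrs.items():
--             if not val:
--                 continue
--             key_l = str(key).lower()
--             if pkey in key_l:
--                 return str(val)
--     return None
-- ===== SOURCE B (Python) =====
-- def _extract_workgroup_from_attrs(ivr_attrs):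
--     if not isinstance(ivr_attrs, dict):
--         return None
--     priority_keys = ["workgroup", "wg", "departman", "department", "menu", "selection", "secim"]
--     best_idx = None
--     best_val = None
--     for key, val in ivr_attrs.items():
--         if not val:
--             continue
--         key_l = str(key).lower()
--         for i, pkey in enumerate(priority_keys):
--             if pkey in key_l:
--                 if best_idx is None or i < best_idx:
--                     best_idx = i
--                     best_val = str(val)
--                 break
--     return best_val
-- ===== Notes on version B (the rewrite author's own statement) =====
-- stated objective: alternative
-- what changed: Loop interchange: instead of rescanning all dict items once per priority key (priority-major, up to 7 passes), B makes a single pass over the items, keeping the best (lowest) matched priority index and its value, with strict '<' so dict-order ties keep the earlier item.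
import Mathlib
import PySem

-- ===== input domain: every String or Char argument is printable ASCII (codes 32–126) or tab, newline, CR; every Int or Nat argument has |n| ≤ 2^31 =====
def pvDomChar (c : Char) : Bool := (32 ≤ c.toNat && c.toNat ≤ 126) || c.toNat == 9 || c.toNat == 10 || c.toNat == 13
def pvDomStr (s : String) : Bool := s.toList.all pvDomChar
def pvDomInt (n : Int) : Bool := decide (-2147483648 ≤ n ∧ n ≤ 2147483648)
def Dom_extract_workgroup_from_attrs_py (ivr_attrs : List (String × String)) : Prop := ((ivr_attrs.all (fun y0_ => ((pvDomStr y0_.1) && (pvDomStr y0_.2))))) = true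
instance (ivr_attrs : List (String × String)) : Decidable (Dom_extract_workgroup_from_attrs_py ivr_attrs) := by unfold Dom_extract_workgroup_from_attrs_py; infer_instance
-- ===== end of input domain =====

-- B replaces A's priority-major rescans (one pass over the items per priority key) by a single
-- item-major pass keeping the best (lowest) matched priority index and its value (alternative
-- decomposition; return value identical).

-- ===== PORT A =====
def pvPriorityKeys : List String :=
  ["workgroup", "wg", "departman", "department", "menu", "selection", "secim"]

-- inner loop of A: first item with truthy val whose lowered key contains pkey
def pvInnerA (pkey : String) : List (String × String) → Option String
  | [] => none
  | (k, v) :: t =>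
    if v = "" then pvInnerA pkey t
    else if PySem.Str.isIn pkey (PySem.Str.lower k) then some v
    else pvInnerA pkey t

-- outer loop of A over the priority keys
def pvFindA : List String → List (String × String) → Option String
  | [], _ => none
  | p :: ps, xs =>
    match pvInnerA p xs with
    | some v => some v
    | none => pvFindA ps xs

def extract_workgroup_from_attrs_py (ivr_attrs : List (String × String)) : Option String :=
  pvFindA pvPriorityKeys ivr_attrs

-- ===== PORT B =====
-- inner enumerate-with-break of B: index of the first priority key contained in kl
def pvFirstIdx : List String → String → Nat → Option Nat
  | [], _, _ => none
  | p :: ps, kl, i =>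
    if PySem.Str.isIn p kl then some i else pvFirstIdx ps kl (i + 1)

-- single pass of B over the items, carrying best_idx / best_val
def pvGoB : List (String × String) → Option Nat → Option String → Option String
  | [], _, bestVal => bestVal
  | (k, v) :: t, bestIdx, bestVal =>
    if v = "" then pvGoB t bestIdx bestVal
    else
      match pvFirstIdx pvPriorityKeys (PySem.Str.lower k) 0 with
      | none => pvGoB t bestIdx bestVal
      | some i =>
        match bestIdx with
        | none => pvGoB t (some i) (some v)
        | some j => if i < j then pvGoB t (some i) (some v) else pvGoB t bestIdx bestVal

def extract_workgroup_from_attrs_py_alt (ivr_attrs : List (String × String)) : Option String :=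
  pvGoB ivr_attrs none none

-- ===== PRECONDITION & SPEC =====
def Spec_extract_workgroup_from_attrs_py (ivr_attrs : List (String × String)) (out : Option String) : Prop := out = extract_workgroup_from_attrs_py_alt ivr_attrs
instance (ivr_attrs : List (String × String)) (out : Option String) : Decidable (Spec_extract_workgroup_from_attrs_py ivr_attrs out) := by unfold Spec_extract_workgroup_from_attrs_py; infer_instance

-- ===== CLAIM (what is proved, stated in full; the proofs are below) =====
def Claim_equal_extract_workgroup_from_attrs_py : Prop := ∀ (ivr_attrs : List (String × String)), Dom_extract_workgroup_from_attrs_py ivr_attrs → Spec_extract_workgroup_from_attrs_py ivr_attrs (extract_workgroup_from_attrs_py ivr_attrs)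

-- ===== LEMMAS AND PROOFS =====

-- candidate of one item w.r.t. a priority list: its lowest matched index, paired with its value
def pvCand (ps : List String) (k v : String) : Option (Nat × String) :=
  if v = "" then none
  else (pvFirstIdx ps (PySem.Str.lower k) 0).map (fun i => (i, v))

-- merge two optional candidates, the RIGHT one winning only on strictly smaller index
def pvComb : Option (Nat × String) → Option (Nat × String) → Option (Nat × String)
  | none, m => m
  | some c, none => some c
  | some c, some d => if d.1 < c.1 then some d else some c

-- minimal candidate of a list of items (right-recursion reformulation of B's pass)
def pvMinR (ps : List String) : List (String × String) → Option (Nat × String)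
  | [] => none
  | (k, v) :: t => pvComb (pvCand ps k v) (pvMinR ps t)

-- merge a definite candidate with an optional one (B's accumulator update)
def pvComb2 (c : Nat × String) : Option (Nat × String) → Nat × String
  | none => c
  | some d => if d.1 < c.1 then d else c

theorem pvFirstIdx_shift (ps : List String) (kl : String) (n : Nat) :
    pvFirstIdx ps kl (n + 1) = (pvFirstIdx ps kl n).map (· + 1) := by
  induction ps generalizing n with
  | nil => rfl
  | cons p ps ih =>
    simp only [pvFirstIdx]
    split
    · rfl
    · exact ih (n + 1)

theorem pvCand_cons (p : String) (ps : List String) (k v : String) :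
    pvCand (p :: ps) k v =
      if v = "" then none
      else if PySem.Str.isIn p (PySem.Str.lower k) then some (0, v)
      else (pvCand ps k v).map (fun c => (c.1 + 1, c.2)) := by
  simp only [pvCand, pvFirstIdx, pvFirstIdx_shift]
  split
  · rfl
  · split
    · rfl
    · cases pvFirstIdx ps (PySem.Str.lower k) 0 <;> rfl

theorem pvMinR_nil_ps (xs : List (String × String)) : pvMinR [] xs = none := by
  induction xs with
  | nil => rfl
  | cons x t ih =>
    obtain ⟨k, v⟩ := x
    simp only [pvMinR, pvCand, pvFirstIdx, ih]
    split <;> rfl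

-- if no item matches p, the candidates w.r.t. (p :: ps) are those w.r.t. ps, indices shifted up
theorem pvMinR_cons_of_inner_none (p : String) (ps : List String)
    (xs : List (String × String)) (h : pvInnerA p xs = none) :
    pvMinR (p :: ps) xs = (pvMinR ps xs).map (fun c => (c.1 + 1, c.2)) := by
  induction xs with
  | nil => rfl
  | cons x t ih =>
    obtain ⟨k, v⟩ := x
    simp only [pvInnerA] at h
    simp only [pvMinR, pvCand_cons]
    by_cases hv : v = ""
    · simp only [hv, reduceIte] at h ⊢
      simpa [pvComb] using ih h
    · simp only [hv, reduceIte] at h ⊢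
      simp only [PySem.Str.isIn_eq, PySem.Str.toList_lower] at h ⊢
      by_cases hm : PySem.Chars.isIn p.toList (PySem.Chars.lower k.toList) = true
      · rw [if_pos hm] at h
        exact absurd h (by simp)
      · rw [if_neg hm] at h
        rw [if_neg hm, ih h]
        cases pvCand ps k v with
        | none => simp [pvComb]
        | some c =>
          cases pvMinR ps t with
          | none => simp [pvComb]
          | some d =>
            simp only [Option.map_some, pvComb]
            by_cases hd : d.1 < c.1
            · simp [hd]
            · simp [hd]

-- if the first item matching p has value v, the minimal candidate w.r.t. (p :: ps) is (0, v)
theorem pvMinR_cons_of_inner_some (p : String) (ps : List String)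
    (xs : List (String × String)) (v : String) (h : pvInnerA p xs = some v) :
    pvMinR (p :: ps) xs = some (0, v) := by
  induction xs with
  | nil => simp [pvInnerA] at h
  | cons x t ih =>
    obtain ⟨k, w⟩ := x
    simp only [pvInnerA] at h
    simp only [pvMinR, pvCand_cons]
    by_cases hw : w = ""
    · simp only [hw, reduceIte] at h ⊢
      simpa [pvComb] using ih h
    · simp only [hw, reduceIte] at h ⊢
      simp only [PySem.Str.isIn_eq, PySem.Str.toList_lower] at h ⊢
      by_cases hm : PySem.Chars.isIn p.toList (PySem.Chars.lower k.toList) = true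
      · rw [if_pos hm] at h
        rw [if_pos hm]
        cases h
        cases pvMinR (p :: ps) t with
        | none => rfl
        | some d => simp [pvComb]
      · rw [if_neg hm] at h
        rw [if_neg hm, ih h]
        cases pvCand ps k w with
        | none => simp [pvComb]
        | some c => simp [pvComb]

theorem pvFindA_eq_minR (ps : List String) (xs : List (String × String)) :
    pvFindA ps xs = (pvMinR ps xs).map Prod.snd := by
  induction ps with
  | nil => simp [pvFindA, pvMinR_nil_ps]
  | cons p ps ih =>
    simp only [pvFindA]
    cases h : pvInnerA p xs with
    | none =>
      rw [ih, pvMinR_cons_of_inner_none p ps xs h]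
      cases pvMinR ps xs <;> rfl
    | some v =>
      rw [pvMinR_cons_of_inner_some p ps xs v h]
      rfl

theorem pvComb_some (c : Nat × String) (m : Option (Nat × String)) :
    pvComb (some c) m = some (pvComb2 c m) := by
  cases m with
  | none => rfl
  | some d =>
    simp only [pvComb, pvComb2]
    split <;> rfl

theorem pvComb2_assoc (j : Nat) (w : String) (c : Nat × String) (m : Option (Nat × String)) :
    pvComb2 (j, w) (pvComb (some c) m) = pvComb2 (if c.1 < j then c else (j, w)) m := by
  obtain ⟨i, v⟩ := c
  cases m with
  | none =>
    simp only [pvComb, pvComb2]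
  | some d =>
    obtain ⟨l, u⟩ := d
    by_cases h1 : l < i
    · simp only [pvComb, if_pos h1, pvComb2]
      split_ifs <;> first | rfl | (exfalso; omega)
    · simp only [pvComb, if_neg h1, pvComb2]
      split_ifs <;> first | rfl | (exfalso; omega)

theorem pvGoB_some (xs : List (String × String)) (j : Nat) (w : String) :
    pvGoB xs (some j) (some w) = some (pvComb2 (j, w) (pvMinR pvPriorityKeys xs)).2 := by
  induction xs generalizing j w with
  | nil => rfl
  | cons x t ih =>
    obtain ⟨k, v⟩ := x
    simp only [pvGoB, pvMinR, pvCand]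
    by_cases hv : v = ""
    · simp [hv, pvComb, ih]
    · simp only [if_neg hv]
      cases hf : pvFirstIdx pvPriorityKeys (PySem.Str.lower k) 0 with
      | none => simp [pvComb, ih]
      | some i =>
        simp only [Option.map_some, pvComb2_assoc]
        by_cases hij : i < j
        · simp [hij, ih]
        · simp [hij, ih]

theorem pvGoB_none (xs : List (String × String)) :
    pvGoB xs none none = (pvMinR pvPriorityKeys xs).map Prod.snd := by
  induction xs with
  | nil => rfl
  | cons x t ih =>
    obtain ⟨k, v⟩ := x
    simp only [pvGoB, pvMinR, pvCand]
    by_cases hv : v = ""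
    · simp [hv, pvComb, ih]
    · simp only [if_neg hv]
      cases hf : pvFirstIdx pvPriorityKeys (PySem.Str.lower k) 0 with
      | none => simp [pvComb, ih]
      | some i => simp [pvGoB_some, pvComb_some]

-- ===== VERDICT (by name: the statement is the Claim_ definition above) =====
theorem extract_workgroup_from_attrs_py_spec : Claim_equal_extract_workgroup_from_attrs_py := by
  intro ivr_attrs _
  unfold Spec_extract_workgroup_from_attrs_py extract_workgroup_from_attrs_py extract_workgroup_from_attrs_py_alt
  rw [pvFindA_eq_minR, pvGoB_none]
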